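-- pv_equiv track=rewrite | github.com/insanebear/CodingInterviewPrep | insanebear/HighScoreKit/hash1.py | solution
-- ===== SOURCE A (Python) =====
-- from collections import Counter
--
-- def solution(participant, completion):
--     """
--         Counter: Counts list members' appearance, and returns dictionary. { member: appearance }
--     """
--     p_dict = Counter(participant) # O(n)
--
--     for c in completion: # O(n)
--         if c in p_dict.keys(): # O(1)
--             p_dict[c] -= 1
--
--             if p_dict[c] == 0:
--                 del p_dict[c]
--
--     return list(p_dict.keys())[0]
-- ===== SOURCE B (Python) =====
-- from collections import Counter
--
-- def solution(participant, completion):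
--     pc = Counter(participant)
--     cc = Counter(completion)
--     remaining = [p for p in dict.fromkeys(participant) if pc[p] > cc[p]]
--     return remaining[0]
-- ===== Notes on version B (the rewrite author's own statement) =====
-- stated objective: simpler
-- what changed: Replaces A's in-place decrement-and-delete mutation loop over completion with two fixed frequency tables and one ordered filter pass over the deduplicated participants.
import Mathlib
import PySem

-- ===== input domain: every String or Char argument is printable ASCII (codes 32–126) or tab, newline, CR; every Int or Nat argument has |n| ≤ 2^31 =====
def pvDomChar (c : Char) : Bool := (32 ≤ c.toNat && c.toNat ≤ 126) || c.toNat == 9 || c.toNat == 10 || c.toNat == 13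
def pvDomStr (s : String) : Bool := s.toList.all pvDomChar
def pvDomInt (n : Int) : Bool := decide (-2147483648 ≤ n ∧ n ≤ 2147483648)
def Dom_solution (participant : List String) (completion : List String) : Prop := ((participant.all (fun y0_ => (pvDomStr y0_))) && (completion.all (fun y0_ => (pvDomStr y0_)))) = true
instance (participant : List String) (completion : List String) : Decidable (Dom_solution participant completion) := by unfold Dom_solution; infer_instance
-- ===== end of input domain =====

-- B replaces A's in-place decrement-and-delete mutation loop over completion with two fixed
-- frequency tables and one ordered filter pass over the deduplicated participants (objective: simpler).

-- ===== PORT A =====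
-- Counter(participant), then the decrement/delete loop over completion, then list(keys)[0]
-- (the IndexError on an empty final dict is excluded by Pre_solution; headD "" stands in there).
def solution (participant : List String) (completion : List String) : String :=
  let pdict :=
    completion.foldl (fun d c =>
      if d.contains c then
        let d' := d.modify c 0 (fun v => v - 1)
        if d'.getD c 0 = 0 then d'.erase c else d'
      else d) (PySem.Dict.counter participant)
  pdict.keys.headD ""

-- ===== PORT B =====
-- pc = Counter(participant); cc = Counter(completion);
-- remaining = [p for p in dict.fromkeys(participant) if pc[p] > cc[p]]; return remaining[0]
def solution_alt (participant : List String) (completion : List String) : String :=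
  let pc := PySem.Dict.counter participant
  let cc := PySem.Dict.counter completion
  let remaining := (PySem.List.dedup participant).filter (fun p => cc.getD p 0 < pc.getD p 0)
  remaining.headD ""

-- ===== PRECONDITION & SPEC =====
-- Pre_ excludes exactly the inputs where some participant is left over by nothing:
-- when every participant name is matched by completion, A's list(p_dict.keys())[0] raises IndexError
-- (and B's remaining[0] raises too).
def Pre_solution (participant : List String) (completion : List String) : Prop :=
  ∃ x ∈ participant, completion.count x < participant.count x
instance (participant : List String) (completion : List String) : Decidable (Pre_solution participant completion) := by
  unfold Pre_solution; infer_instance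
def pvWitness_solution : List String × List String := (["a"], [])

def Spec_solution (participant : List String) (completion : List String) (out : String) : Prop := out = solution_alt participant completion
instance (participant : List String) (completion : List String) (out : String) : Decidable (Spec_solution participant completion out) := by unfold Spec_solution; infer_instance

-- ===== CLAIM (what is proved, stated in full; the proofs are below) =====
def Claim_equal_solution : Prop := ∀ (participant : List String) (completion : List String), Dom_solution participant completion → Pre_solution participant completion → Spec_solution participant completion (solution participant completion)

-- ===== LEMMAS AND PROOFS =====

def tbl {κ ν : Type} (S : List κ) (g : κ → ν) : List (κ × ν) := S.map (fun p => (p, g p))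

theorem tbl_contains {κ ν : Type} [BEq κ] [LawfulBEq κ] (S : List κ) (g : κ → ν) (x : κ) :
    (PySem.Dict.mk (tbl S g)).contains x = S.contains x := by
  induction S with
  | nil => simp [PySem.Dict.contains, tbl]
  | cons a t ih =>
    simp_all [PySem.Dict.contains, tbl]
    rw [BEq.comm]

theorem tbl_get? {κ ν : Type} [BEq κ] [LawfulBEq κ] (S : List κ) (g : κ → ν) (x : κ) :
    (PySem.Dict.mk (tbl S g)).get? x = if x ∈ S then some (g x) else none := by
  induction S with
  | nil => simp [PySem.Dict.get?, tbl]
  | cons a t ih =>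
    by_cases h : a = x
    · subst h; simp [PySem.Dict.get?, tbl]
    · have hb : (a == x) = false := by simp [h]
      simp only [PySem.Dict.get?, tbl, List.map_cons] at *
      rw [List.find?_cons_of_neg (by simp [hb])]
      rw [ih]
      simp [List.mem_cons, Ne.symm h]

theorem tbl_insert_mem {κ ν : Type} [BEq κ] [LawfulBEq κ] (S : List κ) (g : κ → ν) (x : κ) (v : ν)
    (h : x ∈ S) :
    (PySem.Dict.mk (tbl S g)).insert x v = PySem.Dict.mk (tbl S (fun p => if p == x then v else g p)) := by
  have hc : (PySem.Dict.mk (tbl S g)).contains x = true := by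
    rw [tbl_contains]; simpa using h
  simp only [tbl] at hc
  simp only [PySem.Dict.insert, hc, if_true, tbl, List.map_map]
  congr 1
  apply List.map_congr_left
  intro p _
  by_cases hp : p = x <;> simp [hp]

theorem tbl_insert_not_mem {κ ν : Type} [BEq κ] [LawfulBEq κ] (S : List κ) (g : κ → ν) (x : κ) (v : ν)
    (h : x ∉ S) :
    (PySem.Dict.mk (tbl S g)).insert x v = PySem.Dict.mk (tbl (S ++ [x]) (fun p => if p == x then v else g p)) := by
  have hc : (PySem.Dict.mk (tbl S g)).contains x = false := by
    rw [tbl_contains]; simpa using h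
  simp only [tbl] at hc
  simp only [PySem.Dict.insert, hc, Bool.false_eq_true, if_false, tbl, List.map_append,
    List.map_cons, List.map_nil, PySem.Dict.mk.injEq]
  refine congrArg₂ (· ++ ·) ?_ (by simp)
  apply List.map_congr_left
  intro p hp
  have hpx : p ≠ x := fun e => h (e ▸ hp)
  simp [hpx]

theorem tbl_erase {κ ν : Type} [BEq κ] [LawfulBEq κ] (S : List κ) (g : κ → ν) (x : κ) :
    (PySem.Dict.mk (tbl S g)).erase x = PySem.Dict.mk (tbl (S.filter (fun p => !(p == x))) g) := by
  simp only [PySem.Dict.erase, tbl, List.filter_map]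
  congr 1

theorem counter_items {κ : Type} [BEq κ] [LawfulBEq κ] (xs : List κ) :
    (PySem.Dict.counter xs).items = tbl (PySem.Set.ofList xs) (fun p => (xs.count p : Int)) := by
  induction xs using List.reverseRecOn with
  | nil => simp [PySem.Dict.counter, PySem.Set.ofList, tbl, PySem.Dict.empty, PySem.Set.empty]
  | append_singleton t x ih =>
    have hfold : PySem.Dict.counter (t ++ [x]) =
        (PySem.Dict.counter t).modify x 0 (fun n => n + 1) := by
      simp [PySem.Dict.counter, List.foldl_append]
    have hgetD : (PySem.Dict.counter t).getD x 0 = (t.count x : Int) :=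
      PySem.Dict.getD_counter t x
    have hofl : PySem.Set.ofList (t ++ [x]) = PySem.Set.add (PySem.Set.ofList t) x := by
      simp [PySem.Set.ofList, List.foldl_append]
    have hd : PySem.Dict.counter t = PySem.Dict.mk (tbl (PySem.Set.ofList t) (fun p => (t.count p : Int))) := by
      cases hdc : PySem.Dict.counter t with
      | mk items => simp_all
    by_cases hx : x ∈ t
    · have hmem : x ∈ PySem.Set.ofList t := (PySem.Set.mem_ofList t x).2 hx
      have hcon : (PySem.Set.ofList t).contains x = true := by simpa using hmem
      have hadd : PySem.Set.add (PySem.Set.ofList t) x = PySem.Set.ofList t := by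
        simp only [PySem.Set.add, hcon, if_true]
      rw [hfold, PySem.Dict.modify, hgetD, hd, tbl_insert_mem _ _ _ _ hmem, hofl, hadd]
      simp only [tbl, PySem.Dict.mk.injEq]
      apply List.map_congr_left
      intro p hp
      by_cases hpx : p = x
      · subst hpx; simp [List.count_append]
      · simp [hpx, List.count_append, List.count_eq_zero, Ne.symm hpx]
    · have hmem : x ∉ PySem.Set.ofList t := fun h => hx ((PySem.Set.mem_ofList t x).1 h)
      have hcon : (PySem.Set.ofList t).contains x = false := by simpa using hmem
      have hadd : PySem.Set.add (PySem.Set.ofList t) x = PySem.Set.ofList t ++ [x] := by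
        simp only [PySem.Set.add, hcon, Bool.false_eq_true, if_false]
      rw [hfold, PySem.Dict.modify, hgetD, hd, tbl_insert_not_mem _ _ _ _ hmem, hofl, hadd]
      simp only [tbl, List.map_append, List.map_cons, List.map_nil, PySem.Dict.mk.injEq]
      refine congrArg₂ (· ++ ·) ?_ (by simp [List.count_append])
      apply List.map_congr_left
      intro p hp
      have hpx : p ≠ x := fun e => hmem (e ▸ hp)
      simp [hpx, List.count_append, List.count_eq_zero, Ne.symm hpx]

def stepA (d : PySem.Dict String Int) (c : String) : PySem.Dict String Int :=
  if d.contains c then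
    let d' := d.modify c 0 (fun v => v - 1)
    if d'.getD c 0 = 0 then d'.erase c else d'
  else d

theorem loop_items (participant cs : List String) :
    (cs.foldl stepA (PySem.Dict.counter participant)).items =
      tbl ((PySem.Set.ofList participant).filter (fun p => decide (cs.count p < participant.count p)))
        (fun p => (participant.count p : Int) - cs.count p) := by
  induction cs using List.reverseRecOn with
  | nil =>
    rw [List.foldl_nil, counter_items]
    have hfil : (PySem.Set.ofList participant).filter (fun p => decide (List.count p [] < participant.count p)) = PySem.Set.ofList participant := by
      apply List.filter_eq_self.2
      intro p hp
      have : p ∈ participant := (PySem.Set.mem_ofList participant p).1 hp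
      simpa using List.count_pos_iff.2 this
    rw [hfil]
    simp [tbl]
  | append_singleton cs c ih =>
    rw [List.foldl_append, List.foldl_cons, List.foldl_nil]
    set S' := (PySem.Set.ofList participant).filter (fun p => decide (cs.count p < participant.count p)) with hS'
    have hd : cs.foldl stepA (PySem.Dict.counter participant) =
        PySem.Dict.mk (tbl S' (fun p => (participant.count p : Int) - cs.count p)) := by
      cases hdc : cs.foldl stepA (PySem.Dict.counter participant) with
      | mk items => simp_all
    rw [hd]
    by_cases hc : c ∈ S'
    · have hcS : c ∈ participant ∧ cs.count c < participant.count c := by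
        have := List.of_mem_filter hc
        have hm := List.mem_of_mem_filter hc
        exact ⟨(PySem.Set.mem_ofList participant c).1 hm, by simpa using this⟩
      have hcont : (PySem.Dict.mk (tbl S' (fun p => (participant.count p : Int) - cs.count p))).contains c = true := by
        rw [tbl_contains]; simpa using hc
      rw [stepA, if_pos hcont]
      simp only [PySem.Dict.modify]
      have hgd : (PySem.Dict.mk (tbl S' (fun p => (participant.count p : Int) - cs.count p))).getD c 0 = (participant.count c : Int) - cs.count c := by
        rw [PySem.Dict.getD, tbl_get?, if_pos hc, Option.getD_some]
      rw [hgd, tbl_insert_mem _ _ _ _ hc]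
      set g'' : String → Int := fun p => if p == c then (participant.count c : Int) - cs.count c - 1 else (participant.count p : Int) - cs.count p with hg''
      have hget2 : (PySem.Dict.mk (tbl S' g'')).getD c 0 = (participant.count c : Int) - cs.count c - 1 := by
        rw [PySem.Dict.getD, tbl_get?, if_pos hc, Option.getD_some, hg'']
        simp
      rw [hget2]
      by_cases hz : (participant.count c : Int) - cs.count c - 1 = 0
      · rw [if_pos hz, tbl_erase]
        have hcnt : (cs ++ [c]).count c = participant.count c := by
          simp [List.count_append]
          omega
        have hfil : S'.filter (fun p => !(p == c)) =
            (PySem.Set.ofList participant).filter (fun p => decide ((cs ++ [c]).count p < participant.count p)) := by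
          rw [hS', List.filter_filter]
          apply List.filter_congr
          intro p hp
          by_cases hpc : p = c
          · subst hpc
            simp [hcnt]
          · simp [hpc, List.count_append, List.count_eq_zero, Ne.symm hpc]
        rw [hfil]
        simp only [tbl, PySem.Dict.mk.injEq]
        apply List.map_congr_left
        intro p hp
        have hpc : p ≠ c := by
          rcases List.mem_filter.1 hp with ⟨-, hbp⟩
          intro e; subst e
          simp [hcnt] at hbp
        simp [hg'', hpc, List.count_append, List.count_eq_zero, Ne.symm hpc]
      · rw [if_neg hz]
        have hfil : S' = (PySem.Set.ofList participant).filter (fun p => decide ((cs ++ [c]).count p < participant.count p)) := by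
          rw [hS']
          apply List.filter_congr
          intro p hp
          by_cases hpc : p = c
          · subst hpc
            have hz' : participant.count p ≠ cs.count p + 1 := by
              intro e
              apply hz
              rw [e]
              push_cast
              ring
            simp only [List.count_append, List.count_cons_self, List.count_nil]
            rw [decide_eq_decide]
            omega
          · simp [hpc, List.count_append, List.count_eq_zero, Ne.symm hpc]
        rw [← hfil]
        simp only [tbl, PySem.Dict.mk.injEq]
        apply List.map_congr_left
        intro p hp
        by_cases hpc : p = c
        · subst hpc
          simp [hg'', List.count_append]
          ring
        · simp [hg'', hpc, List.count_append, List.count_eq_zero, Ne.symm hpc]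
    · have hcont : (PySem.Dict.mk (tbl S' (fun p => (participant.count p : Int) - cs.count p))).contains c = false := by
        rw [tbl_contains]; simpa using hc
      rw [stepA, if_neg (by simp [hcont])]
      have hfil : S' = (PySem.Set.ofList participant).filter (fun p => decide ((cs ++ [c]).count p < participant.count p)) := by
        rw [hS']
        apply List.filter_congr
        intro p hp
        by_cases hpc : p = c
        · subst hpc
          have hnp : ¬ (cs.count p < participant.count p) := by
            intro hlt
            exact hc (List.mem_filter.2 ⟨hp, by simpa using hlt⟩)
          simp [List.count_append, hnp]
          omega
        · simp [hpc, List.count_append, List.count_eq_zero, Ne.symm hpc]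
      rw [← hfil]
      simp only [tbl, PySem.Dict.mk.injEq]
      apply List.map_congr_left
      intro p hp
      have hpc : p ≠ c := fun e => hc (e ▸ hp)
      simp [hpc, List.count_append, Ne.symm hpc]


-- ===== VERDICT (by name: the statement is the Claim_ definition above) =====
theorem solution_spec : Claim_equal_solution := by
  intro participant completion _ _
  unfold Spec_solution solution solution_alt
  have hlam : (fun (d : PySem.Dict String Int) (c : String) =>
      if d.contains c then
        let d' := d.modify c 0 (fun v => v - 1)
        if d'.getD c 0 = 0 then d'.erase c else d'
      else d) = stepA := rfl
  rw [hlam]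
  simp only []
  have hkeys : (completion.foldl stepA (PySem.Dict.counter participant)).keys =
      (PySem.Set.ofList participant).filter (fun p => decide (completion.count p < participant.count p)) := by
    rw [PySem.Dict.keys, loop_items]
    simp [tbl, List.map_map, Function.comp_def]
  rw [hkeys]
  have hfil : (PySem.List.dedup participant).filter
        (fun p => decide ((PySem.Dict.counter completion).getD p 0 < (PySem.Dict.counter participant).getD p 0)) =
      (PySem.Set.ofList participant).filter (fun p => decide (completion.count p < participant.count p)) := by
    apply List.filter_congr
    intro p hp
    rw [PySem.Dict.getD_counter, PySem.Dict.getD_counter, decide_eq_decide]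
    exact_mod_cast Iff.rfl
  rw [hfil]
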